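-- pv_equiv track=rewrite | github.com/Yamil-28/interfazGraficaOpenHouse_I_2026 | Calculos/core_xml/mainxml.py | generar_interfaces_switch
-- ===== SOURCE A (Python) =====
-- def generar_interfaces_switch(sw):
--     puertos_config = sw.get("puertos", {})
--     texto = ""
--     # FastEthernet 1-24
--     for i in range(1, 25):
--         nombre = f"FastEthernet0/{i}"
--         texto += f"      <LINE>interface {nombre}</LINE>\n"
--         if nombre in puertos_config:
--             cfg = puertos_config[nombre]
--             if cfg["modo"] == "access":
--                 texto += f"      <LINE> switchport mode access</LINE>\n"
--                 texto += f"      <LINE> switchport access vlan {cfg['vlan']}</LINE>\n"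
--             elif cfg["modo"] == "trunk":
--                 texto += f"      <LINE> switchport mode trunk</LINE>\n"
--         texto += "      <LINE>!</LINE>\n"
--     # Gigabit
--     for i in range(1, 3):
--         nombre = f"GigabitEthernet0/{i}"
--         texto += f"      <LINE>interface {nombre}</LINE>\n"
--         if nombre in puertos_config:
--             cfg = puertos_config[nombre]
--             if cfg["modo"] == "trunk":
--                 texto += f"      <LINE> switchport mode trunk</LINE>\n"
--         texto += "      <LINE>!</LINE>\n"
--     return texto
-- ===== SOURCE B (Python) =====
-- def _clasifica(nombre, cfg, fe_names, gi_names):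
--     # extra config lines for one configured port, or None if it contributes none
--     if nombre in fe_names:
--         modo = cfg["modo"]
--         if modo == "access":
--             return [" switchport mode access", f" switchport access vlan {cfg['vlan']}"]
--         if modo == "trunk":
--             return [" switchport mode trunk"]
--     elif nombre in gi_names:
--         if cfg["modo"] == "trunk":
--             return [" switchport mode trunk"]
--     return None
--
--
-- def _bloque(nombre, extras):
--     cuerpo = ["interface " + nombre] + extras.get(nombre, []) + ["!"]
--     return "".join(f"      <LINE>{l}</LINE>\n" for l in cuerpo)
--
--
-- def generar_interfaces_switch(sw):
--     fe_names = [f"FastEthernet0/{i}" for i in range(1, 25)]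
--     gi_names = [f"GigabitEthernet0/{i}" for i in range(1, 3)]
--     # single pass over the configured ports, building an index name -> extra lines
--     extras = {}
--     for nombre, cfg in sw.get("puertos", {}).items():
--         lineas = _clasifica(nombre, cfg, fe_names, gi_names)
--         if lineas is not None:
--             extras[nombre] = lineas
--     # pure render pass over the fixed interface table
--     return "".join(_bloque(nombre, extras) for nombre in fe_names + gi_names)
-- ===== Notes on version B (the rewrite author's own statement) =====
-- stated objective: alternative
-- what changed: Inverts the traversal: instead of A's two per-interface loops each probing the dict, B makes one pass over puertos.items() classifying each configured port into an extras index, then a pure render pass maps the fixed 26-name table to uniformly wrapped blocks joined once.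
-- outside the precondition, e.g. on generar_interfaces_switch({'puertos': {'FastEthernet0/1': {'vlan': '9'}}}): A raises KeyError, B raises KeyError
import Mathlib
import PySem

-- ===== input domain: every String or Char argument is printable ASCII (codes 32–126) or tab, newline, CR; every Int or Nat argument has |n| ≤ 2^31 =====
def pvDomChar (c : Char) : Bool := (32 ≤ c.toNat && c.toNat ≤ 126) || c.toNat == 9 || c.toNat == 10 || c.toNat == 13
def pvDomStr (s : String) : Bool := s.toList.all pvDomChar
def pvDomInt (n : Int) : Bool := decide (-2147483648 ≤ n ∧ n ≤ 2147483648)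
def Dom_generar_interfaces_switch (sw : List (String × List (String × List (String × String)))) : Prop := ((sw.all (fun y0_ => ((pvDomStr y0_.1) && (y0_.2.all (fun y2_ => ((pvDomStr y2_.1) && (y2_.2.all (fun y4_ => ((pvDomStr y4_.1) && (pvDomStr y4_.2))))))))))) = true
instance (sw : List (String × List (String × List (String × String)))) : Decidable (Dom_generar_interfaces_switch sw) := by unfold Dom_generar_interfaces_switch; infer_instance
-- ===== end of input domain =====

-- B inverts the traversal: one pass over puertos.items() building an extras index, then a pure
-- render pass over the fixed 26-name table; A loops per interface probing the dict. Same output.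

-- ===== PORT A =====
-- one iteration of A's FastEthernet loop (cfg["modo"]/cfg["vlan"] via getD; exact under Pre_,
-- which excludes exactly the inputs where the Python raises KeyError)
def pvStepFE (pc : PySem.Dict String (List (String × String))) (texto : String) (i : Int) : String :=
  let nombre : String := "FastEthernet0/" ++ PySem.Int.toStr i
  let texto := texto ++ ("      <LINE>interface " ++ nombre ++ "</LINE>\n")
  let texto :=
    match PySem.Dict.get? pc nombre with   -- 'nombre in puertos_config' then puertos_config[nombre]
    | some cfg =>
      if PySem.Dict.getD (PySem.Dict.mk cfg) "modo" "" = "access" then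
        texto ++ "      <LINE> switchport mode access</LINE>\n"
          ++ ("      <LINE> switchport access vlan " ++ PySem.Dict.getD (PySem.Dict.mk cfg) "vlan" "" ++ "</LINE>\n")
      else if PySem.Dict.getD (PySem.Dict.mk cfg) "modo" "" = "trunk" then
        texto ++ "      <LINE> switchport mode trunk</LINE>\n"
      else texto
    | none => texto
  texto ++ "      <LINE>!</LINE>\n"

-- one iteration of A's Gigabit loop
def pvStepGI (pc : PySem.Dict String (List (String × String))) (texto : String) (i : Int) : String :=
  let nombre : String := "GigabitEthernet0/" ++ PySem.Int.toStr i
  let texto := texto ++ ("      <LINE>interface " ++ nombre ++ "</LINE>\n")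
  let texto :=
    match PySem.Dict.get? pc nombre with
    | some cfg =>
      if PySem.Dict.getD (PySem.Dict.mk cfg) "modo" "" = "trunk" then
        texto ++ "      <LINE> switchport mode trunk</LINE>\n"
      else texto
    | none => texto
  texto ++ "      <LINE>!</LINE>\n"

def generar_interfaces_switch (sw : List (String × List (String × List (String × String)))) : String :=
  let pc := PySem.Dict.mk ((PySem.Dict.get? (PySem.Dict.mk sw) "puertos").getD [])
  let texto : String := ""
  let texto := (PySem.List.pyRange 1 25 1).foldl (pvStepFE pc) texto
  let texto := (PySem.List.pyRange 1 3 1).foldl (pvStepGI pc) texto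
  texto

-- ===== PORT B =====
def pvFeNames : List String := (PySem.List.pyRange 1 25 1).map (fun i => "FastEthernet0/" ++ PySem.Int.toStr i)
def pvGiNames : List String := (PySem.List.pyRange 1 3 1).map (fun i => "GigabitEthernet0/" ++ PySem.Int.toStr i)

-- _clasifica: the extra config lines one configured port contributes, none if it contributes none
def pvClasifica (nombre : String) (cfg : PySem.Dict String String) : Option (List String) :=
  if pvFeNames.contains nombre then
    (if PySem.Dict.getD cfg "modo" "" = "access" then
       some [" switchport mode access", " switchport access vlan " ++ PySem.Dict.getD cfg "vlan" ""]
     else if PySem.Dict.getD cfg "modo" "" = "trunk" then some [" switchport mode trunk"]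
     else none)
  else if pvGiNames.contains nombre then
    (if PySem.Dict.getD cfg "modo" "" = "trunk" then some [" switchport mode trunk"] else none)
  else none

-- body of B's indexing loop: record the port's lines under its name, or skip it
def pvStepExtras (d : PySem.Dict String (List String)) (p : String × List (String × String)) :
    PySem.Dict String (List String) :=
  match pvClasifica p.1 (PySem.Dict.mk p.2) with
  | some lineas => d.insert p.1 lineas
  | none => d

-- _bloque: render one interface block from the extras index
def pvBloque (nombre : String) (extras : PySem.Dict String (List String)) : String :=
  PySem.Str.join ""
    ((["interface " ++ nombre] ++ PySem.Dict.getD extras nombre [] ++ ["!"]).map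
      (fun l => "      <LINE>" ++ l ++ "</LINE>\n"))

def generar_interfaces_switch_alt (sw : List (String × List (String × List (String × String)))) : String :=
  let pc := PySem.Dict.mk ((PySem.Dict.get? (PySem.Dict.mk sw) "puertos").getD [])
  let extras := pc.items.foldl pvStepExtras PySem.Dict.empty
  PySem.Str.join "" ((pvFeNames ++ pvGiNames).map (fun nombre => pvBloque nombre extras))

-- ===== PRECONDITION & SPEC =====
def pvCfgHas (cfg : List (String × String)) (k : String) : Bool :=
  (PySem.Dict.get? (PySem.Dict.mk cfg) k).isSome

-- Pre_ excludes (a) exactly the inputs on which the Python A raises KeyError — a configured port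
-- among the 26 whose cfg lacks "modo", or a FastEthernet access cfg lacking "vlan" — and
-- (b) "puertos" association lists that repeat a key, which no Python dict can represent (there
-- first-match lookup and last-wins insertion are both accidental encodings of the same dict).
def Pre_generar_interfaces_switch (sw : List (String × List (String × List (String × String)))) : Prop :=
  let pairs := (PySem.Dict.get? (PySem.Dict.mk sw) "puertos").getD []
  (pairs.map Prod.fst).Nodup ∧
  ((pvFeNames.all (fun n =>
      ((PySem.Dict.get? (PySem.Dict.mk pairs) n).map (fun cfg =>
          pvCfgHas cfg "modo" &&
          (!(PySem.Dict.getD (PySem.Dict.mk cfg) "modo" "" == "access") || pvCfgHas cfg "vlan"))).getD true)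
   && pvGiNames.all (fun n =>
      ((PySem.Dict.get? (PySem.Dict.mk pairs) n).map (fun cfg => pvCfgHas cfg "modo")).getD true)) = true)
instance (sw : List (String × List (String × List (String × String)))) : Decidable (Pre_generar_interfaces_switch sw) := by
  unfold Pre_generar_interfaces_switch; infer_instance

def pvWitness_generar_interfaces_switch : (List (String × List (String × List (String × String)))) :=
  [("puertos", [("FastEthernet0/1", [("modo","access"),("vlan","10")]),
                ("GigabitEthernet0/2", [("modo","trunk")])])]

def Spec_generar_interfaces_switch (sw : List (String × List (String × List (String × String)))) (out : String) : Prop := out = generar_interfaces_switch_alt sw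
instance (sw : List (String × List (String × List (String × String)))) (out : String) : Decidable (Spec_generar_interfaces_switch sw out) := by unfold Spec_generar_interfaces_switch; infer_instance

-- ===== CLAIM (what is proved, stated in full; the proofs are below) =====
def Claim_equal_generar_interfaces_switch : Prop := ∀ (sw : List (String × List (String × List (String × String)))), Dom_generar_interfaces_switch sw → Pre_generar_interfaces_switch sw → Spec_generar_interfaces_switch sw (generar_interfaces_switch sw)

-- ===== LEMMAS AND PROOFS =====
theorem pvIntersperse_nil_flatten (l : List (List Char)) :
    (List.intersperse ([] : List Char) l).flatten = l.flatten := by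
  induction l with
  | nil => rfl
  | cons a t ih =>
    cases t with
    | nil => rfl
    | cons b t' => simp_all [List.intersperse]

theorem pvCharsJoin_nil (l : List (List Char)) :
    PySem.Chars.join [] l = l.flatten := by
  simp [PySem.Chars.join, List.intercalate, pvIntersperse_nil_flatten]

-- extras never records a key no pair of the loop carries
theorem pvExtras_get?_of_not_mem (pairs : List (String × List (String × String)))
    (d : PySem.Dict String (List String)) (n : String) (h : ∀ p ∈ pairs, p.1 ≠ n) :
    PySem.Dict.get? (pairs.foldl pvStepExtras d) n = PySem.Dict.get? d n := by
  induction pairs generalizing d with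
  | nil => rfl
  | cons p rest ih =>
    have hp : p.1 ≠ n := h p (List.mem_cons_self)
    have := ih (pvStepExtras d p) (fun q hq => h q (List.mem_cons_of_mem _ hq))
    rw [List.foldl_cons, this]
    unfold pvStepExtras
    cases pvClasifica p.1 (PySem.Dict.mk p.2) with
    | none => rfl
    | some ls => exact PySem.Dict.get?_insert_of_ne d ls (Ne.symm hp)

-- characterisation of the extras index: under unique keys, the recorded lines for n are exactly
-- what _clasifica returns on the (first-match) cfg of n
theorem pvExtras_get? (pairs : List (String × List (String × String)))
    (d : PySem.Dict String (List String)) (n : String) (hnd : (pairs.map Prod.fst).Nodup) :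
    PySem.Dict.get? (pairs.foldl pvStepExtras d) n =
      match PySem.Dict.get? (PySem.Dict.mk pairs) n with
      | some cfg =>
        (match pvClasifica n (PySem.Dict.mk cfg) with
         | some ls => some ls
         | none => PySem.Dict.get? d n)
      | none => PySem.Dict.get? d n := by
  induction pairs generalizing d with
  | nil => rfl
  | cons p rest ih =>
    simp only [List.map_cons, List.nodup_cons] at hnd
    rw [List.foldl_cons, PySem.Dict.get?_mk_cons]
    by_cases hp : p.1 = n
    · subst hp
      simp only [beq_self_eq_true, if_true]
      have hrest : ∀ q ∈ rest, q.1 ≠ p.1 := by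
        intro q hq heq
        exact hnd.1 (heq ▸ List.mem_map_of_mem hq)
      rw [pvExtras_get?_of_not_mem rest _ p.1 hrest]
      unfold pvStepExtras
      cases pvClasifica p.1 (PySem.Dict.mk p.2) with
      | none => rfl
      | some ls => simp [PySem.Dict.get?_insert_self]
    · have hb : (p.1 == n) = false := beq_eq_false_iff_ne.mpr hp
      rw [hb, if_neg (by simp)]
      rw [ih (pvStepExtras d p) hnd.2]
      cases hcl : pvClasifica p.1 (PySem.Dict.mk p.2) with
      | none => simp [pvStepExtras, hcl]
      | some ls =>
        simp [pvStepExtras, hcl, PySem.Dict.get?_insert_of_ne d ls (Ne.symm hp)]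

theorem pvStrJoin_append (xs ys : List String) :
    PySem.Str.join "" (xs ++ ys) = PySem.Str.join "" xs ++ PySem.Str.join "" ys := by
  apply String.toList_inj.mp
  simp [pvCharsJoin_nil]

theorem pvFoldl_blocks (f : String → Int → String) (g : Int → String) (r : List Int)
    (h : ∀ t i, i ∈ r → f t i = t ++ g i) :
    ∀ (t : String), r.foldl f t = t ++ PySem.Str.join "" (r.map g) := by
  induction r with
  | nil => intro t; apply String.toList_inj.mp; simp
  | cons a r ih =>
    intro t
    rw [List.foldl_cons, h t a (List.mem_cons_self),
      ih (fun t i hi => h t i (List.mem_cons_of_mem _ hi))]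
    apply String.toList_inj.mp
    simp [pvCharsJoin_nil]

-- the extras index of the given pc
def pvExtrasOf (pc : PySem.Dict String (List (String × String))) : PySem.Dict String (List String) :=
  pc.items.foldl pvStepExtras PySem.Dict.empty

-- the recorded extra lines of a FastEthernet name, read back from the index
theorem pvExtras_getD_FE (pc : PySem.Dict String (List (String × String)))
    (hnd : (pc.items.map Prod.fst).Nodup) (n : String) (hc : pvFeNames.contains n = true) :
    PySem.Dict.getD (pvExtrasOf pc) n [] =
      match PySem.Dict.get? pc n with
      | some cfg =>
        if PySem.Dict.getD (PySem.Dict.mk cfg) "modo" "" = "access" then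
          [" switchport mode access", " switchport access vlan " ++ PySem.Dict.getD (PySem.Dict.mk cfg) "vlan" ""]
        else if PySem.Dict.getD (PySem.Dict.mk cfg) "modo" "" = "trunk" then [" switchport mode trunk"]
        else []
      | none => [] := by
  rw [PySem.Dict.getD_eq_get?_getD]
  unfold pvExtrasOf
  rw [pvExtras_get? pc.items PySem.Dict.empty n hnd]
  have hpc : PySem.Dict.mk pc.items = pc := rfl
  rw [hpc]
  cases PySem.Dict.get? pc n with
  | none => simp [PySem.Dict.get?_empty]
  | some cfg =>
    unfold pvClasifica
    rw [hc]
    simp only [if_true]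
    split_ifs <;> rfl

-- the recorded extra lines of a Gigabit name
theorem pvExtras_getD_GI (pc : PySem.Dict String (List (String × String)))
    (hnd : (pc.items.map Prod.fst).Nodup) (n : String)
    (hcf : pvFeNames.contains n = false) (hc : pvGiNames.contains n = true) :
    PySem.Dict.getD (pvExtrasOf pc) n [] =
      match PySem.Dict.get? pc n with
      | some cfg =>
        if PySem.Dict.getD (PySem.Dict.mk cfg) "modo" "" = "trunk" then [" switchport mode trunk"]
        else []
      | none => [] := by
  rw [PySem.Dict.getD_eq_get?_getD]
  unfold pvExtrasOf
  rw [pvExtras_get? pc.items PySem.Dict.empty n hnd]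
  have hpc : PySem.Dict.mk pc.items = pc := rfl
  rw [hpc]
  cases PySem.Dict.get? pc n with
  | none => simp [PySem.Dict.get?_empty]
  | some cfg =>
    unfold pvClasifica
    rw [hcf, hc]
    simp only [if_true, Bool.false_eq_true, if_false]
    split_ifs <;> rfl

theorem pvStepFE_eq (pc : PySem.Dict String (List (String × String)))
    (hnd : (pc.items.map Prod.fst).Nodup) (t : String) (i : Int) (hi : i ∈ PySem.List.pyRange 1 25 1) :
    pvStepFE pc t i = t ++ pvBloque ("FastEthernet0/" ++ PySem.Int.toStr i) (pvExtrasOf pc) := by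
  have hc : pvFeNames.contains ("FastEthernet0/" ++ PySem.Int.toStr i) = true := by
    have : ("FastEthernet0/" ++ PySem.Int.toStr i) ∈ pvFeNames :=
      List.mem_map_of_mem hi
    simpa using this
  unfold pvStepFE pvBloque
  rw [pvExtras_getD_FE pc hnd _ hc]
  cases hg : PySem.Dict.get? pc ("FastEthernet0/" ++ PySem.Int.toStr i) with
  | none => apply String.toList_inj.mp; simp [hg, pvCharsJoin_nil]
  | some cfg =>
    simp only [hg]
    apply String.toList_inj.mp
    split_ifs <;> simp [pvCharsJoin_nil]

theorem pvStepGI_eq (pc : PySem.Dict String (List (String × String)))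
    (hnd : (pc.items.map Prod.fst).Nodup) (t : String) (i : Int) (hi : i ∈ PySem.List.pyRange 1 3 1) :
    pvStepGI pc t i = t ++ pvBloque ("GigabitEthernet0/" ++ PySem.Int.toStr i) (pvExtrasOf pc) := by
  have hi12 : i = 1 ∨ i = 2 := by
    rw [PySem.List.mem_pyRange_one] at hi; omega
  have hcf : pvFeNames.contains ("GigabitEthernet0/" ++ PySem.Int.toStr i) = false := by
    rcases hi12 with h | h <;> subst h <;> decide
  have hc : pvGiNames.contains ("GigabitEthernet0/" ++ PySem.Int.toStr i) = true := by
    rcases hi12 with h | h <;> subst h <;> decide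
  unfold pvStepGI pvBloque
  rw [pvExtras_getD_GI pc hnd _ hcf hc]
  cases hg : PySem.Dict.get? pc ("GigabitEthernet0/" ++ PySem.Int.toStr i) with
  | none => apply String.toList_inj.mp; simp [hg, pvCharsJoin_nil]
  | some cfg =>
    simp only [hg]
    apply String.toList_inj.mp
    split_ifs <;> simp [pvCharsJoin_nil]

-- ===== VERDICT (by name: the statement is the Claim_ definition above) =====
theorem generar_interfaces_switch_spec : Claim_equal_generar_interfaces_switch := by
  intro sw _ hpre
  obtain ⟨hnd, -⟩ := hpre
  unfold Spec_generar_interfaces_switch generar_interfaces_switch generar_interfaces_switch_alt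
  dsimp only
  set pc := PySem.Dict.mk ((PySem.Dict.get? (PySem.Dict.mk sw) "puertos").getD []) with hpc
  have hnd' : (pc.items.map Prod.fst).Nodup := hnd
  rw [pvFoldl_blocks _ _ _ (fun t i hi => pvStepFE_eq pc hnd' t i hi),
      pvFoldl_blocks _ _ _ (fun t i hi => pvStepGI_eq pc hnd' t i hi)]
  simp only [pvFeNames, pvGiNames, List.map_append, List.map_map, Function.comp_def,
    pvStrJoin_append, pvExtrasOf, hpc]
  apply String.toList_inj.mp
  simp
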